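-- pv_equiv track=rewrite | github.com/ZHDKk/driver_io | utils/helpers.py | node_path2id2
-- ===== SOURCE A (Python) =====
-- def node_path2id2(input_str):
--     parts = [p for p in input_str.split('/') if p]
--     processed = []
--
--     for part in parts:
--         # 如果是数字且前一个元素可追加索引
--         if part.isdigit() and processed and processed[-1][1] is None:
--             prev_name, _ = processed.pop()
--             processed.append((prev_name, part))
--         else:
--             processed.append((part, None))
--
--     # 构建带索引的路径字符串
--     path = []
--     for name, index in processed:
--         if index is not None:
--             path.append(f'"{name}"[{index}]')
--         else:
--             path.append(f'"{name}"')
--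
--     return f'ns=3;s={".".join(path)}'
-- ===== SOURCE B (Python) =====
-- def node_path2id2(input_str):
--     parts = [p for p in input_str.split('/') if p]
--     path = []
--     i = 0
--     while i < len(parts):
--         name = parts[i]
--         if i + 1 < len(parts) and parts[i + 1].isdigit():
--             path.append(f'"{name}"[{parts[i + 1]}]')
--             i += 2
--         else:
--             path.append(f'"{name}"')
--             i += 1
--     return f'ns=3;s={".".join(path)}'
-- ===== Notes on version B (the rewrite author's own statement) =====
-- stated objective: simpler
-- what changed: Replaces the pop/re-append state machine over a list of (name, index) pairs plus a second formatting loop with a single forward pass that pairs each name with an optional trailing digit by one-step lookahead and formats it immediately.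
import Mathlib
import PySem

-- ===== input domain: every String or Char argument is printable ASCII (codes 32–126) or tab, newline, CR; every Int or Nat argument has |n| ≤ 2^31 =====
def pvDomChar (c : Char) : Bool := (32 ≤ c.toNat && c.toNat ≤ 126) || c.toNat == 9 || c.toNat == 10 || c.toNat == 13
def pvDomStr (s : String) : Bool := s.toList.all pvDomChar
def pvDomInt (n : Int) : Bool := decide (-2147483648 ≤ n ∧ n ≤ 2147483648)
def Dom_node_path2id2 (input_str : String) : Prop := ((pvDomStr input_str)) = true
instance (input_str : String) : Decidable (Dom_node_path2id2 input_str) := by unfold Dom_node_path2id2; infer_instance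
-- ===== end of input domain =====

-- B replaces A's pop/re-append state machine plus a second formatting loop with a single
-- forward pass pairing each name with an optional trailing digit by lookahead (objective: simpler).

-- ===== PORT A =====
-- A's loop body: pop/re-append when the part is a digit and the last pair has no index yet
def pvStepA (acc : List (List Char × Option (List Char))) (part : List Char) :
    List (List Char × Option (List Char)) :=
  if PySem.Chars.strIsdigit part then
    match acc.getLast? with
    | some (prevName, none) => acc.dropLast ++ [(prevName, some part)]
    | _ => acc ++ [(part, none)]
  else acc ++ [(part, none)]

-- A's second loop: format one (name, index) pair
def pvFmtA (p : List Char × Option (List Char)) : List Char :=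
  match p.2 with
  | some idx => '"' :: p.1 ++ '"' :: '[' :: idx ++ [']']
  | none => '"' :: p.1 ++ ['"']

def node_path2id2 (input_str : String) : String :=
  let parts := (PySem.Chars.splitOn input_str.toList "/".toList).filter (fun p => !p.isEmpty)
  let processed := parts.foldl pvStepA []
  let path := processed.map pvFmtA
  String.ofList ("ns=3;s=".toList ++ PySem.Chars.join ['.'] path)

-- ===== PORT B =====
-- B's while loop: format parts[i] directly, consuming a following digit as its index
def pvAltLoop : List (List Char) → List (List Char)
  | [] => []
  | [x] => ['"' :: x ++ ['"']]
  | x :: y :: rest =>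
    if PySem.Chars.strIsdigit y then
      ('"' :: x ++ '"' :: '[' :: y ++ [']']) :: pvAltLoop rest
    else
      ('"' :: x ++ ['"']) :: pvAltLoop (y :: rest)

def node_path2id2_alt (input_str : String) : String :=
  let parts := (PySem.Chars.splitOn input_str.toList "/".toList).filter (fun p => !p.isEmpty)
  String.ofList ("ns=3;s=".toList ++ PySem.Chars.join ['.'] (pvAltLoop parts))

-- ===== PRECONDITION & SPEC =====
def Spec_node_path2id2 (input_str : String) (out : String) : Prop := out = node_path2id2_alt input_str
instance (input_str : String) (out : String) : Decidable (Spec_node_path2id2 input_str out) := by unfold Spec_node_path2id2; infer_instance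

-- ===== CLAIM (what is proved, stated in full; the proofs are below) =====
def Claim_equal_node_path2id2 : Prop := ∀ (input_str : String), Dom_node_path2id2 input_str → Spec_node_path2id2 input_str (node_path2id2 input_str)

-- ===== LEMMAS AND PROOFS =====

-- B's lookahead pairing, as pairs (proof device relating the two loops)
def pvPairUp : List (List Char) → List (List Char × Option (List Char))
  | [] => []
  | [x] => [(x, none)]
  | x :: y :: rest =>
    if PySem.Chars.strIsdigit y then (x, some y) :: pvPairUp rest
    else (x, none) :: pvPairUp (y :: rest)

-- an accumulator the fold can never attach a digit to
def pvClosed (acc : List (List Char × Option (List Char))) : Prop :=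
  ∀ q, acc.getLast? = some q → q.2.isSome

theorem pvClosed_nil : pvClosed [] := by intro q h; simp at h

theorem pvStepA_push (acc : List (List Char × Option (List Char))) (x : List Char)
    (h : PySem.Chars.strIsdigit x = true → pvClosed acc) :
    pvStepA acc x = acc ++ [(x, none)] := by
  unfold pvStepA
  split_ifs with hd
  · rcases hl : acc.getLast? with _ | ⟨n, i⟩
    · simp
    · rcases i with _ | i
      · exact absurd (h hd _ hl) (by simp)
      · simp
  · rfl

theorem pvFold_eq_pairUp (l : List (List Char)) :
    ∀ acc : List (List Char × Option (List Char)),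
      (∀ x ∈ l.head?, PySem.Chars.strIsdigit x = true → pvClosed acc) →
      l.foldl pvStepA acc = acc ++ pvPairUp l := by
  induction l using pvPairUp.induct with
  | case1 => intro acc _; simp [pvPairUp]
  | case2 x =>
    intro acc h
    simp only [List.foldl, pvPairUp]
    exact pvStepA_push acc x (h x (by simp))
  | case3 x y rest hd ih =>
    intro acc h
    have h1 : pvStepA acc x = acc ++ [(x, none)] := pvStepA_push acc x (h x (by simp))
    have h2 : pvStepA (acc ++ [(x, none)]) y = acc ++ [(x, some y)] := by
      unfold pvStepA
      simp [hd]
    rw [List.foldl_cons, h1, List.foldl_cons, h2]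
    rw [ih (acc ++ [(x, some y)]) (by
      intro z _ _ q hq
      rw [List.getLast?_concat] at hq
      cases hq; simp)]
    simp [pvPairUp, hd]
  | case4 x y rest hd ih =>
    intro acc h
    have h1 : pvStepA acc x = acc ++ [(x, none)] := pvStepA_push acc x (h x (by simp))
    rw [List.foldl_cons, h1]
    rw [ih (acc ++ [(x, none)]) (by intro z hz hdz; simp at hz; subst hz; simp [hdz] at hd)]
    simp [pvPairUp, hd]

theorem pvAltLoop_eq_map (l : List (List Char)) :
    pvAltLoop l = (pvPairUp l).map pvFmtA := by
  induction l using pvPairUp.induct with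
  | case1 => rfl
  | case2 x => rfl
  | case3 x y rest hd ih => simp [pvAltLoop, pvPairUp, hd, ih, pvFmtA]
  | case4 x y rest hd ih => simp [pvAltLoop, pvPairUp, hd, ih, pvFmtA]

-- ===== VERDICT (by name: the statement is the Claim_ definition above) =====
theorem node_path2id2_spec : Claim_equal_node_path2id2 := by
  intro input_str _
  unfold Spec_node_path2id2 node_path2id2 node_path2id2_alt
  have hf := pvFold_eq_pairUp
    ((PySem.Chars.splitOn input_str.toList "/".toList).filter (fun p => !p.isEmpty)) []
    (fun _ _ _ => pvClosed_nil)
  simp only [hf, List.nil_append, pvAltLoop_eq_map]
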